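-- pv_equiv track=rewrite | github.com/sambergin/OldWork | mod.py | sub_table
-- ===== SOURCE A (Python) =====
-- def sub_table(m):
--     if type(m) != int or m <= 0:
--         table = 'Error(sub_table): Invalid mod'
--     else:
--         table = [["" for i in range(m)] for j in range(m)]
--
--         for i in range(m):
--
--             for j in range(m):
--                 table[i][j] = (i - j) % m
--
--
--     return table
-- ===== SOURCE B (Python) =====
-- def sub_table(m):
--     if type(m) != int or m <= 0:
--         return 'Error(sub_table): Invalid mod'
--     row = [(-j) % m for j in range(m)]
--     table = []
--     for _ in range(m):
--         table.append(row)
--         row = [(x + 1) % m for x in row]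
--     return table
-- ===== Notes on version B (the rewrite author's own statement) =====
-- stated objective: alternative
-- what changed: B builds the table by a row recurrence (first row is (-j)%m, each next row is (x+1)%m of the previous) instead of computing (i-j)%m independently per cell.
-- outside the precondition, e.g. on sub_table(0): A returns 'Error(sub_table): Invalid mod', B returns 'Error(sub_table): Invalid mod'
import Mathlib
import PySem

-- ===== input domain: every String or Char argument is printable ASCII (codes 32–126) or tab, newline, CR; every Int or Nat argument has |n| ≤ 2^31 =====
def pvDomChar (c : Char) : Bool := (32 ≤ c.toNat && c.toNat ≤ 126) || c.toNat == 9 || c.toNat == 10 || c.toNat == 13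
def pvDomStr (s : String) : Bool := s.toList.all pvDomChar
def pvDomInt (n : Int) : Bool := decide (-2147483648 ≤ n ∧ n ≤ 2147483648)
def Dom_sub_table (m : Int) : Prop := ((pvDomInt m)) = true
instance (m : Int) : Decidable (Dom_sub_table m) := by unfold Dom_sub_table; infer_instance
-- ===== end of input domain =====

-- B builds the same table by a row recurrence instead of the independent (i-j)%m per cell.
-- Mutation note: A mutates only its locally created table; no argument is mutated.

-- ===== PORT A =====
-- per-cell double loop: table[i][j] = (i - j) % m
def sub_table (m : Int) : List (List Int) :=
  (PySem.List.pyRange 0 m 1).map (fun i =>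
    (PySem.List.pyRange 0 m 1).map (fun j => PySem.Int.mod (i - j) m))

-- ===== PORT B =====
-- row recurrence: row0 = [(-j) % m], next row = [(x+1) % m for x in row]
def sub_table_alt (m : Int) : List (List Int) :=
  let row0 := (PySem.List.pyRange 0 m 1).map (fun j => PySem.Int.mod (-j) m)
  ((PySem.List.pyRange 0 m 1).foldl
     (fun (st : List (List Int) × List Int) _ =>
        (st.1 ++ [st.2], st.2.map (fun x => PySem.Int.mod (x + 1) m)))
     (([] : List (List Int)), row0)).1

-- ===== PRECONDITION & SPEC =====
-- On m ≤ 0 Python A returns the error STRING 'Error(sub_table): Invalid mod', not a list of lists,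
-- so those inputs leave the declared return type and are excluded (B returns the same string there).
def Pre_sub_table (m : Int) : Prop := 0 < m
instance (m : Int) : Decidable (Pre_sub_table m) := by unfold Pre_sub_table; infer_instance
def pvWitness_sub_table : Int := (3)
def Spec_sub_table (m : Int) (out : List (List Int)) : Prop := out = sub_table_alt m
instance (m : Int) (out : List (List Int)) : Decidable (Spec_sub_table m out) := by unfold Spec_sub_table; infer_instance

-- ===== CLAIM (what is proved, stated in full; the proofs are below) =====
def Claim_equal_sub_table : Prop := ∀ (m : Int), Dom_sub_table m → Pre_sub_table m → Spec_sub_table m (sub_table m)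

-- ===== LEMMAS AND PROOFS =====

-- A's row i, as a function of i
def pvRowA (m i : Int) : List Int :=
  (PySem.List.pyRange 0 m 1).map (fun j => PySem.Int.mod (i - j) m)

-- stepping the recurrence turns row i into row i+1
theorem pvRow_step (m i : Int) (hm : 0 < m) :
    (pvRowA m i).map (fun x => PySem.Int.mod (x + 1) m) = pvRowA m (i + 1) := by
  unfold pvRowA
  simp only [List.map_map]
  apply List.map_congr_left
  intro j _
  simp only [Function.comp, PySem.Int.mod_eq_emod_of_pos hm]
  conv_rhs => rw [show i + 1 - j = (i - j) + 1 by ring]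
  rw [Int.add_emod ((i - j) % m) 1, Int.emod_emod_of_dvd _ dvd_rfl, ← Int.add_emod]

-- fold invariant: after n steps the accumulator holds rows 0..n-1 and the live row is row n
theorem pvFold_inv (m : Int) (hm : 0 < m) (n : Nat) :
    ((PySem.List.pyRange 0 (n : Int) 1).foldl
      (fun (st : List (List Int) × List Int) _ =>
        (st.1 ++ [st.2], st.2.map (fun x => PySem.Int.mod (x + 1) m)))
      (([] : List (List Int)), pvRowA m 0))
    = ((PySem.List.pyRange 0 (n : Int) 1).map (fun i => pvRowA m i), pvRowA m (n : Int)) := by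
  induction n with
  | zero => simp
  | succ k ih =>
      have h : ((k : Int) + 1) = ((k + 1 : Nat) : Int) := by push_cast; ring
      rw [← h, PySem.List.pyRange_one_succ_right (by positivity)]
      simp only [List.foldl_append, List.foldl_cons, List.foldl_nil, ih, List.map_append,
        List.map_cons, List.map_nil]
      exact Prod.ext rfl (pvRow_step m _ hm)

-- ===== VERDICT (by name: the statement is the Claim_ definition above) =====
theorem sub_table_spec : Claim_equal_sub_table := by
  intro m _ hm
  unfold Spec_sub_table sub_table sub_table_alt
  lift m to ℕ using (le_of_lt hm) with n
  show (PySem.List.pyRange 0 (n : Int) 1).map (fun i =>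
        (PySem.List.pyRange 0 (n : Int) 1).map (fun j => PySem.Int.mod (i - j) (n : Int)))
      = ((PySem.List.pyRange 0 (n : Int) 1).foldl
          (fun (st : List (List Int) × List Int) _ =>
            (st.1 ++ [st.2], st.2.map (fun x => PySem.Int.mod (x + 1) (n : Int))))
          (([] : List (List Int)),
           (PySem.List.pyRange 0 (n : Int) 1).map (fun j => PySem.Int.mod (-j) (n : Int)))).1
  have hrow0 : (PySem.List.pyRange 0 (n : Int) 1).map (fun j => PySem.Int.mod (-j) (n : Int))
      = pvRowA (n : Int) 0 := by
    unfold pvRowA; apply List.map_congr_left; intro j _; rw [zero_sub]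
  rw [hrow0, pvFold_inv (n : Int) hm n]
  rfl
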